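-- pv_equiv track=rewrite | github.com/rnaksdl/IR-See | scripts/401_guess_angle.py | prioritize_same_digit_pins
-- ===== SOURCE A (Python) =====
-- PIN_LENGTH = 4
--
-- def prioritize_same_digit_pins(pin_scores, is_same_digit):
--     if not is_same_digit: return pin_scores
--     priority_pins = [str(d)*PIN_LENGTH for d in range(1,10)] + ["0"*PIN_LENGTH]
--     prioritized_scores, non_priority = [], []
--     for pin, score in pin_scores:
--         if pin not in priority_pins: non_priority.append((pin, score))
--     for p_pin in priority_pins:
--         for pin, score in pin_scores:
--             if pin == p_pin:
--                 prioritized_scores.append((pin, score)); break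
--     prioritized_scores.extend(non_priority)
--     return prioritized_scores
-- ===== SOURCE B (Python) =====
-- PIN_LENGTH = 4
--
-- def prioritize_same_digit_pins(pin_scores, is_same_digit):
--     if not is_same_digit:
--         return pin_scores
--     priority_pins = [str(d) * PIN_LENGTH for d in range(1, 10)] + ["0" * PIN_LENGTH]
--     prio = set(priority_pins)
--     seen = {}
--     non_priority = []
--     for pin, score in pin_scores:
--         if pin in prio:
--             if pin not in seen:
--                 seen[pin] = score
--         else:
--             non_priority.append((pin, score))
--     return [(p, seen[p]) for p in priority_pins if p in seen] + non_priority
-- ===== Notes on version B (the rewrite author's own statement) =====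
-- stated objective: alternative
-- what changed: Replaces A's second phase (for each of the 10 priority pins, rescan the whole pin_scores list for its first occurrence) with a single pass over pin_scores that builds a first-seen dict for priority pins and the non-priority list at once, then emits in fixed priority order from the dict.
import Mathlib
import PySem

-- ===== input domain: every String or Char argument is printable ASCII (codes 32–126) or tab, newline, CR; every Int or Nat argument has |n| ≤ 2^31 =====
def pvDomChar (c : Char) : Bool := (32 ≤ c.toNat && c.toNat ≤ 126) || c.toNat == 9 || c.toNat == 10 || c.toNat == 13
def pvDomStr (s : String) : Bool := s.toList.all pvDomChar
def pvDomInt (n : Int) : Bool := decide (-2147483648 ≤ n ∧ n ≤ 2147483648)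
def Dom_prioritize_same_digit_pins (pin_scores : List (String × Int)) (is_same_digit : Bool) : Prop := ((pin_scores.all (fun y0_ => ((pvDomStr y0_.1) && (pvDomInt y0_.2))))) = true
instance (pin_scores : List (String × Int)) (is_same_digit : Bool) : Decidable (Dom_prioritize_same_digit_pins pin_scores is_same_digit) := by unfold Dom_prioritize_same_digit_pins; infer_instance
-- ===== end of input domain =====

-- B replaces A's 10 rescans of pin_scores with one pass building a first-seen dict plus
-- the non-priority list, then emits in priority order (same return value, different traversal).

-- ===== PORT A =====
-- str(d) * PIN_LENGTH  (Python string repetition), exact for n ≥ 0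
def pvStrRepeat (s : String) (n : Nat) : String := String.ofList ((List.replicate n s.toList).flatten)

-- priority_pins = [str(d)*PIN_LENGTH for d in range(1,10)] + ["0"*PIN_LENGTH]
def pvPriorityPins : List String :=
  ((PySem.List.pyRange 1 10 1).map (fun d => pvStrRepeat (PySem.Int.toStr d) 4)) ++ [pvStrRepeat "0" 4]

-- inner 'for pin, score in pin_scores: if pin == p_pin: append; break'
def pvFindFirst (p_pin : String) : List (String × Int) → List (String × Int)
  | [] => []
  | (pin, score) :: rest => if pin == p_pin then [(pin, score)] else pvFindFirst p_pin rest

def prioritize_same_digit_pins (pin_scores : List (String × Int)) (is_same_digit : Bool) : List (String × Int) :=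
  if !is_same_digit then pin_scores else
  let priority_pins := pvPriorityPins
  let non_priority := pin_scores.foldl (fun acc ps => if !(priority_pins.contains ps.1) then acc ++ [ps] else acc) []
  let prioritized_scores := priority_pins.foldl (fun acc p_pin => acc ++ pvFindFirst p_pin pin_scores) []
  prioritized_scores ++ non_priority

-- ===== PORT B =====
-- the single pass: seen = first-seen scores of priority pins, np = non-priority entries in order
def pvLoopB (prio : PySem.Set String) (seen : PySem.Dict String Int) (np : List (String × Int)) :
    List (String × Int) → PySem.Dict String Int × List (String × Int)
  | [] => (seen, np)
  | (pin, score) :: rest =>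
    if PySem.Set.contains prio pin then
      if seen.contains pin then pvLoopB prio seen np rest
      else pvLoopB prio (seen.insert pin score) np rest
    else pvLoopB prio seen (np ++ [(pin, score)]) rest

def prioritize_same_digit_pins_alt (pin_scores : List (String × Int)) (is_same_digit : Bool) : List (String × Int) :=
  if !is_same_digit then pin_scores else
  let priority_pins := pvPriorityPins
  let prio := PySem.Set.ofList priority_pins
  let r := pvLoopB prio PySem.Dict.empty [] pin_scores
  (priority_pins.filterMap (fun p => (r.1.get? p).map (fun s => (p, s)))) ++ r.2

-- ===== PRECONDITION & SPEC =====
def Spec_prioritize_same_digit_pins (pin_scores : List (String × Int)) (is_same_digit : Bool) (out : List (String × Int)) : Prop := out = prioritize_same_digit_pins_alt pin_scores is_same_digit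
instance (pin_scores : List (String × Int)) (is_same_digit : Bool) (out : List (String × Int)) : Decidable (Spec_prioritize_same_digit_pins pin_scores is_same_digit out) := by unfold Spec_prioritize_same_digit_pins; infer_instance

-- ===== CLAIM (what is proved, stated in full; the proofs are below) =====
def Claim_equal_prioritize_same_digit_pins : Prop := ∀ (pin_scores : List (String × Int)) (is_same_digit : Bool), Dom_prioritize_same_digit_pins pin_scores is_same_digit → Spec_prioritize_same_digit_pins pin_scores is_same_digit (prioritize_same_digit_pins pin_scores is_same_digit)

-- ===== LEMMAS AND PROOFS =====

lemma pvLoopB_snd (prio : PySem.Set String) :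
    ∀ (xs : List (String × Int)) (seen : PySem.Dict String Int) (np : List (String × Int)),
      (pvLoopB prio seen np xs).2 = np ++ xs.filter (fun ps => !(PySem.Set.contains prio ps.1)) := by
  intro xs
  induction xs with
  | nil => intro seen np; simp [pvLoopB]
  | cons hd tl ih =>
    intro seen np
    obtain ⟨pin, score⟩ := hd
    by_cases h : pin ∈ prio
    · by_cases h2 : seen.contains pin = true <;> simp [pvLoopB, h, h2, ih]
    · simp [pvLoopB, h, ih]

lemma pvLoopB_get? (prio : PySem.Set String) (k : String) (hk : k ∈ prio) :
    ∀ (xs : List (String × Int)) (seen : PySem.Dict String Int) (np : List (String × Int)),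
      (pvLoopB prio seen np xs).1.get? k
        = (seen.get? k).or ((xs.find? (fun ps => ps.1 == k)).map (fun ps => ps.2)) := by
  intro xs
  induction xs with
  | nil => intro seen np; simp [pvLoopB]
  | cons hd tl ih =>
    intro seen np
    obtain ⟨pin, score⟩ := hd
    by_cases hpk : pin = k
    · subst hpk
      have hc : prio.contains pin = true := by simpa using hk
      simp only [pvLoopB]
      rw [if_pos hc]
      by_cases h2 : seen.contains pin = true
      · rw [if_pos h2, ih]
        have : (seen.get? pin).isSome := by
          rw [← PySem.Dict.contains_eq_isSome_get?]; exact h2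
        cases hg : seen.get? pin with
        | none => rw [hg] at this; simp at this
        | some v => simp [List.find?]
      · rw [if_neg h2, ih]
        have hg : seen.get? pin = none := by
          rw [← Option.not_isSome_iff_eq_none, ← PySem.Dict.contains_eq_isSome_get?]
          simp [h2]
        simp [hg, PySem.Dict.get?_insert_self, List.find?]
    · have hb : (pin == k) = false := by simp [hpk]
      have hfind : ((pin, score) :: tl).find? (fun ps => ps.1 == k) = tl.find? (fun ps => ps.1 == k) := by
        simp [List.find?, hb]
      by_cases h : pin ∈ prio
      · have hc : prio.contains pin = true := by simpa using h
        simp only [pvLoopB]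
        rw [if_pos hc]
        by_cases h2 : seen.contains pin = true
        · rw [if_pos h2, ih, hfind]
        · rw [if_neg h2, ih, hfind, PySem.Dict.get?_insert_of_ne _ _ (fun hc2 => hpk hc2.symm)]
      · have hc : ¬ prio.contains pin = true := by simpa using h
        simp only [pvLoopB]
        rw [if_neg hc, ih, hfind]

lemma pvFindFirst_eq (p : String) :
    ∀ (xs : List (String × Int)),
      pvFindFirst p xs = ((xs.find? (fun ps => ps.1 == p)).map (fun ps => (p, ps.2))).toList := by
  intro xs
  induction xs with
  | nil => simp [pvFindFirst]
  | cons hd tl ih =>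
    obtain ⟨pin, score⟩ := hd
    by_cases h : pin = p
    · subst h; simp [pvFindFirst, List.find?]
    · have hb : (pin == p) = false := by simp [h]
      simp [pvFindFirst, List.find?, hb, ih]

lemma pvEmit_eq (prio : PySem.Set String) (xs : List (String × Int)) :
    ∀ (P : List String), (∀ p ∈ P, p ∈ prio) →
      P.filterMap (fun p => (((pvLoopB prio PySem.Dict.empty [] xs).1.get? p).map (fun s => (p, s))))
        = P.flatMap (fun p => pvFindFirst p xs) := by
  intro P
  induction P with
  | nil => simp
  | cons q Q ih =>
    intro h
    have hq := h q (by simp)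
    have hrest : ∀ p ∈ Q, p ∈ prio := fun p hp => h p (by simp [hp])
    rw [List.filterMap_cons, List.flatMap_cons, ← ih hrest]
    rw [pvLoopB_get? prio q hq xs PySem.Dict.empty [], PySem.Dict.get?_empty, Option.none_or]
    rw [pvFindFirst_eq]
    cases hf : xs.find? (fun ps => ps.1 == q) with
    | none => simp
    | some v => simp

lemma pvPrio_ofList : PySem.Set.ofList pvPriorityPins = pvPriorityPins := by decide

-- ===== VERDICT (by name: the statement is the Claim_ definition above) =====
theorem prioritize_same_digit_pins_spec : Claim_equal_prioritize_same_digit_pins := by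
  intro pin_scores is_same_digit _
  unfold Spec_prioritize_same_digit_pins prioritize_same_digit_pins prioritize_same_digit_pins_alt
  cases is_same_digit with
  | false => rfl
  | true =>
    simp only [Bool.not_true, Bool.false_eq_true, if_false]
    rw [pvLoopB_snd, List.nil_append]
    rw [pvEmit_eq (PySem.Set.ofList pvPriorityPins) pin_scores pvPriorityPins
        (by rw [pvPrio_ofList]; intro p hp; exact hp)]
    rw [PySem.List.foldl_append_eq_flatMap, List.nil_append]
    rw [PySem.List.foldl_append_if_eq_filter, List.nil_append]
    rw [pvPrio_ofList]
    have hc : ∀ x : String, PySem.Set.contains pvPriorityPins x = pvPriorityPins.contains x :=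
      fun _ => rfl
    simp only [hc]
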